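-- pv_equiv track=rewrite | github.com/vchernoy/coding | contests/2018/codejam2018/qualification/saving_universe_gain/saving_universe_gain.py | solve
-- ===== SOURCE A (Python) =====
-- def solve(d, p):
--     shoots = []
--     i = 0
--     for c in p:
--         if c == 'S':
--             shoots.append(i)
--         else:
--             i += 1
--
--     m = len(shoots)
--     if m > d:
--         return -1
--
--     damage = sum(2**i for i in shoots)
--     if damage <= d:
--         return 0
--
--     hacks = 0
--     while damage > d:
--         hacks += 1
--         for i in range(m-1, -1, -1):
--             if i == 0:
--                 if shoots[0] > 0:
--                     shoots[0] -= 1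
--                     damage -= 2**shoots[0]
--                     break
--             else:
--                 if shoots[i-1] < shoots[i]:
--                     shoots[i] -= 1
--                     damage -= 2**shoots[i]
--                     break
--
--     return hacks
-- ===== SOURCE B (Python) =====
-- def solve(d, p):
--     # Count shots per charge level instead of storing shot positions:
--     # levels[k] = number of 'S' characters that appear after exactly k non-'S' characters.
--     levels = []
--     cur = 0
--     m = 0
--     for ch in p:
--         if ch == 'S':
--             cur += 1
--             m += 1
--         else:
--             levels.append(cur)
--             cur = 0
--     levels.append(cur)
--     if m > d:
--         return -1
--     damage = 0
--     k = 0
--     for n in levels: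
--         damage += n << k
--         k += 1
--     if damage <= d:
--         return 0
--     # Greedy: each hack halves one top-level shot.  Process whole levels in one
--     # arithmetic batch instead of rescanning the shot list per hack.
--     hacks = 0
--     carry = 0
--     for k in range(len(levels) - 1, 0, -1):
--         carry += levels[k]
--         if carry:
--             w = 1 << (k - 1)
--             if damage - carry * w <= d:
--                 return hacks + (damage - d + w - 1) // w
--             hacks += carry
--             damage -= carry * w
--     return hacks  # unreachable: with every shot at level 0, damage == m <= d
-- ===== Notes on version B (the rewrite author's own statement) =====
-- stated objective: alternative
-- what changed: B replaces A's shot-position list (rescanned right-to-left once per hack) by per-charge-level shot counts processed top level down, handling each level's hacks in one arithmetic batch with a ceiling division instead of one list scan per hack.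
import Mathlib
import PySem

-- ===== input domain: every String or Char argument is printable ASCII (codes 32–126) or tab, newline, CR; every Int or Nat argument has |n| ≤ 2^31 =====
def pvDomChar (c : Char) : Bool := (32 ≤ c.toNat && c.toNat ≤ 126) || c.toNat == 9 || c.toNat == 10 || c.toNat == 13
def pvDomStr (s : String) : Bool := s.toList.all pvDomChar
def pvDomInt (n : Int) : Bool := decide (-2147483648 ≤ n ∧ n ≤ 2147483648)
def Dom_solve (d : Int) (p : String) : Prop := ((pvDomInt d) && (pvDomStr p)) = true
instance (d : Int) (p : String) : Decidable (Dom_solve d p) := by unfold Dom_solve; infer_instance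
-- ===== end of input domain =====

-- B counts shots per charge level and batches each level's hacks into one ceiling division,
-- instead of A's per-hack right-to-left rescan of the shot-position list (objective: alternative).

-- ===== PORT A =====
-- Exactness notes: every list index A uses is in range, so `List.getD _ _ 0` is Python's `xs[i]`;
-- every exponent in `shoots` is ≥ 0, so `2 ^ x.toNat` is Python's `2 ** x` there.

/-- Port of A's inner `for i in range(m-1, -1, -1)` scan; the argument is the current index.
    `some (shoots', v)` when the loop `break`s after setting `shoots[i] := v`,
    `none` when the for-loop falls through without a `break`. -/
def scanA (shoots : List Int) : Nat → Option (List Int × Int)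
  | 0 =>
    if shoots.getD 0 0 > 0 then
      some (shoots.set 0 (shoots.getD 0 0 - 1), shoots.getD 0 0 - 1)
    else none
  | i+1 =>
    if shoots.getD i 0 < shoots.getD (i+1) 0 then
      some (shoots.set (i+1) (shoots.getD (i+1) 0 - 1), shoots.getD (i+1) 0 - 1)
    else scanA shoots i

/-- One body of A's `while` loop: run the scan starting at index `m-1` (none for `m = 0`). -/
def findHack (shoots : List Int) : Option (List Int × Int) :=
  match shoots.length with
  | 0 => none
  | m+1 => scanA shoots m

/-- Port of A's `while damage > d` loop.  `fuel` only makes the recursion total: `solve` passes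
    `(damage - d).toNat`, which bounds the iteration count (each hack lowers `damage` by ≥ 1).
    The `none` branch is where the Python scan finds no `break` and the `while` loops forever;
    it is unreachable from the states `solve` produces. -/
def loopA (d : Int) : List Int → Int → Int → Nat → Int
  | _, _, hacks, 0 => hacks
  | shoots, damage, hacks, fuel+1 =>
    if d < damage then
      match findHack shoots with
      | some (s', v) => loopA d s' (damage - 2 ^ v.toNat) (hacks + 1) fuel
      | none => hacks + 1
    else hacks

/-- One step of A's first `for c in p` loop: state `(shoots, i)`. -/
def stepA (st : List Int × Int) (c : Char) : List Int × Int :=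
  if c = 'S' then (st.1 ++ [st.2], st.2) else (st.1, st.2 + 1)

def solve (d : Int) (p : String) : Int :=
  let st := p.toList.foldl stepA ([], 0)
  let shoots := st.1
  let m : Int := shoots.length
  if m > d then -1
  else
    let damage := shoots.foldl (fun acc x => acc + 2 ^ x.toNat) 0
    if damage ≤ d then 0
    else loopA d shoots damage 0 (damage - d).toNat

-- ===== PORT B =====

/-- One step of B's `for ch in p` loop: state `(levels, cur, m)`. -/
def stepB (st : List Int × Int × Int) (c : Char) : List Int × Int × Int :=
  if c = 'S' then (st.1, st.2.1 + 1, st.2.2 + 1) else (st.1 ++ [st.2.1], 0, st.2.2)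

/-- Port of B's damage-summing loop (`damage += n << k; k += 1`), accumulator style. -/
def damageB : List Int → Nat → Int → Int
  | [], _, damage => damage
  | n :: t, k, damage => damageB t (k + 1) (damage + n * 2 ^ k)

/-- Port of B's `for k in range(len(levels)-1, 0, -1)` loop; the first argument is the current k.
    `PySem.Int.floordiv` is Python's `//`. -/
def loopB (d : Int) (levels : List Int) : Nat → Int → Int → Int → Int
  | 0, _, hacks, _ => hacks
  | k+1, damage, hacks, carry =>
    let carry := carry + levels.getD (k+1) 0
    if carry ≠ 0 then
      let w : Int := 2 ^ k
      if damage - carry * w ≤ d then hacks + PySem.Int.floordiv (damage - d + w - 1) w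
      else loopB d levels k (damage - carry * w) (hacks + carry) carry
    else loopB d levels k damage hacks carry

def solve_alt (d : Int) (p : String) : Int :=
  let st := p.toList.foldl stepB ([], 0, 0)
  let levels := st.1 ++ [st.2.1]
  if st.2.2 > d then -1
  else
    let damage := damageB levels 0 0
    if damage ≤ d then 0
    else loopB d levels (levels.length - 1) damage 0 0

-- ===== PRECONDITION & SPEC =====
def Spec_solve (d : Int) (p : String) (out : Int) : Prop := out = solve_alt d p
instance (d : Int) (p : String) (out : Int) : Decidable (Spec_solve d p out) := by unfold Spec_solve; infer_instance

-- ===== CLAIM (what is proved, stated in full; the proofs are below) =====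
def Claim_equal_solve : Prop := ∀ (d : Int) (p : String), Dom_solve d p → Spec_solve d p (solve d p)

-- ===== LEMMAS AND PROOFS =====

/-- `expandFrom k ls` is A's shot list corresponding to B's counts `ls` starting at level `k`. -/
def expandFrom : Nat → List Int → List Int
  | _, [] => []
  | k, n :: t => List.replicate n.toNat (k : Int) ++ expandFrom (k + 1) t

/-- Total damage of a shot list. -/
def Dm (s : List Int) : Int := (s.map (fun x => (2 : Int) ^ x.toNat)).sum

/-- The A-state represented by a B-state `(levels, cur, m)`. -/
def linkInv (st : List Int × Int × Int) : List Int × Int :=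
  (expandFrom 0 st.1 ++ List.replicate st.2.1.toNat (st.1.length : Int), (st.1.length : Int))

/-- Invariant of B's first fold. -/
def goodB (st : List Int × Int × Int) : Prop :=
  0 ≤ st.2.1 ∧ (∀ x ∈ st.1, 0 ≤ x) ∧ st.2.2 = ((linkInv st).1.length : Int)

theorem expandFrom_append (a b : List Int) : ∀ k,
    expandFrom k (a ++ b) = expandFrom k a ++ expandFrom (k + a.length) b := by
  induction a with
  | nil => intro k; simp [expandFrom]
  | cons n t ih => intro k; simp [expandFrom, ih (k+1)]; ring_nf

theorem mem_expandFrom (x : Int) : ∀ (ls : List Int) (k : Nat),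
    x ∈ expandFrom k ls → (k : Int) ≤ x ∧ x < (k : Int) + ls.length := by
  intro ls
  induction ls with
  | nil => intro k h; simp [expandFrom] at h
  | cons n t ih =>
      intro k h
      simp only [expandFrom, List.mem_append, List.mem_replicate] at h
      rcases h with ⟨-, rfl⟩ | h
      · simp only [List.length_cons]
        push_cast
        omega
      · have := ih (k+1) h
        simp only [List.length_cons]
        push_cast at this ⊢
        omega

theorem Dm_append (a b : List Int) : Dm (a ++ b) = Dm a + Dm b := by
  simp [Dm]

theorem Dm_replicate (c : Nat) (t : Int) : Dm (List.replicate c t) = c * 2 ^ t.toNat := by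
  induction c with
  | zero => simp [Dm]
  | succ c ih =>
      simp only [List.replicate_succ, Dm, List.map_cons, List.sum_cons] at ih ⊢
      push_cast
      rw [show ((c:Int)+1) * 2 ^ t.toNat = (c:Int) * 2 ^ t.toNat + 2 ^ t.toNat by ring]
      omega

theorem foldl_damageA : ∀ (xs : List Int) (a : Int),
    xs.foldl (fun acc x => acc + 2 ^ x.toNat) a = a + Dm xs := by
  intro xs
  induction xs with
  | nil => intro a; simp [Dm]
  | cons n t ih =>
      intro a
      simp only [List.foldl_cons, ih, Dm, List.map_cons, List.sum_cons]
      ring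

theorem damageB_eq : ∀ (ls : List Int) (k : Nat) (acc : Int), (∀ x ∈ ls, 0 ≤ x) →
    damageB ls k acc = acc + Dm (expandFrom k ls) := by
  intro ls
  induction ls with
  | nil => intro k acc _; simp [damageB, expandFrom, Dm]
  | cons n t ih =>
      intro k acc h
      have hn : 0 ≤ n := h n (by simp)
      simp only [damageB, expandFrom]
      rw [ih (k+1) _ (fun x hx => h x (by simp [hx])), Dm_append, Dm_replicate]
      have h1 : ((k : Int)).toNat = k := by omega
      have h2 : ((n.toNat : Nat) : Int) = n := by omega
      rw [h1, h2]
      ring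

theorem build_link (cs : List Char) : ∀ st, goodB st →
    cs.foldl stepA (linkInv st) = linkInv (cs.foldl stepB st) ∧ goodB (cs.foldl stepB st) := by
  induction cs with
  | nil => intro st h; exact ⟨rfl, h⟩
  | cons c t ih =>
      intro st h
      obtain ⟨hcur, hls, hm⟩ := h
      have key : stepA (linkInv st) c = linkInv (stepB st c) ∧ goodB (stepB st c) := by
        obtain ⟨ls, cur, m⟩ := st
        by_cases hc : c = 'S'
        · subst hc
          simp only [stepA, stepB, linkInv, goodB, if_true] at *
          have h1 : (cur + 1).toNat = cur.toNat + 1 := by omega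
          refine ⟨?_, by omega, hls, ?_⟩
          · simp only [h1, List.replicate_succ']
            simp [List.append_assoc]
          · simp only [h1]
            simp only [List.length_append, List.length_replicate] at hm ⊢
            push_cast at hm ⊢
            omega
        · simp only [stepA, stepB, linkInv, goodB, if_neg hc] at *
          have he : expandFrom 0 (ls ++ [cur]) = expandFrom 0 ls ++ List.replicate cur.toNat (ls.length : Int) := by
            rw [expandFrom_append]
            simp [expandFrom]
          refine ⟨?_, le_refl _, ?_, ?_⟩
          · rw [he]
            simp only [Int.toNat_zero, List.replicate_zero, List.append_nil,
              List.length_append, List.length_singleton]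
            refine Prod.ext rfl ?_
            push_cast
            ring
          · intro x hx
            rcases List.mem_append.1 hx with hx | hx
            · exact hls x hx
            · simp at hx; omega
          · rw [he]
            simp only [Int.toNat_zero, List.replicate_zero, List.append_nil,
              List.length_append, List.length_replicate, List.length_singleton] at hm ⊢
            omega
      rw [List.foldl_cons, List.foldl_cons, key.1]
      exact ih (stepB st c) key.2

-- index/set facts for the scan region
theorem getD_append_rep (s₀ : List Int) (c : Nat) (t : Int) (i : Nat) (h : i < c) :
    (s₀ ++ List.replicate c t).getD (s₀.length + i) 0 = t := by
  simp only [List.getD]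
  rw [List.getElem?_append_right (by omega)]
  simp [h]

theorem getD_append_left' (s₀ s₁ : List Int) (i : Nat) (h : i < s₀.length) :
    (s₀ ++ s₁).getD i 0 = s₀.getD i 0 := by
  rw [List.getD_append _ _ _ _ h]

theorem set_append_rep (s₀ : List Int) (c : Nat) (t v : Int) :
    (s₀ ++ List.replicate (c+1) t).set s₀.length v = s₀ ++ v :: List.replicate c t := by
  rw [List.set_append]
  simp [List.replicate_succ]

theorem scan_skip (s₀ : List Int) (c : Nat) (t : Int) : ∀ j, j ≤ c →
    scanA (s₀ ++ List.replicate (c+1) t) (s₀.length + j) =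
      scanA (s₀ ++ List.replicate (c+1) t) s₀.length := by
  intro j
  induction j with
  | zero => intro _; rfl
  | succ j ih =>
      intro hj
      have h1 : (s₀ ++ List.replicate (c+1) t).getD (s₀.length + j) 0 = t :=
        getD_append_rep _ _ _ _ (by omega)
      have h2 : (s₀ ++ List.replicate (c+1) t).getD (s₀.length + (j+1)) 0 = t := by
        rw [show s₀.length + (j+1) = s₀.length + (j+1) from rfl]
        exact getD_append_rep _ _ _ _ (by omega)
      rw [show s₀.length + (j+1) = (s₀.length + j) + 1 from rfl]
      simp only [scanA, h1]
      rw [show (s₀ ++ List.replicate (c+1) t).getD (s₀.length + j + 1) 0 = t from h2]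
      rw [if_neg (lt_irrefl t)]
      exact ih (by omega)

theorem scan_hit (s₀ : List Int) (c : Nat) (t : Int) (ht : 1 ≤ t)
    (hb : ∀ x ∈ s₀, x < t) :
    scanA (s₀ ++ List.replicate (c+1) t) s₀.length =
      some (s₀ ++ (t - 1) :: List.replicate c t, t - 1) := by
  match hs : s₀ with
  | [] =>
      simp only [List.nil_append]
      have h0 : (List.replicate (c+1) t).getD 0 0 = t := by
        simp [List.replicate_succ]
      simp only [List.length_nil, scanA, h0, if_pos (by omega : t > 0)]
      rw [List.replicate_succ]
      simp
  | a :: s₁ =>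
      have hlen : (a :: s₁).length = s₁.length + 1 := rfl
      rw [hlen]
      have hmem : (a :: s₁).getD s₁.length 0 ∈ (a :: s₁) := by
        rw [List.getD_eq_getElem _ _ (by simp)]
        exact List.getElem_mem _
      have h1 : ((a :: s₁) ++ List.replicate (c+1) t).getD s₁.length 0 = (a :: s₁).getD s₁.length 0 :=
        getD_append_left' _ _ _ (by simp)
      have h2 : ((a :: s₁) ++ List.replicate (c+1) t).getD (s₁.length + 1) 0 = t := by
        have := getD_append_rep (a :: s₁) (c+1) t 0 (by omega)
        simp only [List.length_cons, Nat.add_zero] at this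
        exact this
      simp only [scanA, h1, h2]
      rw [if_pos (hb _ hmem)]
      have := set_append_rep (a :: s₁) c t (t - 1)
      simp only [hlen] at this ⊢
      rw [show s₁.length + 1 = (a :: s₁).length from rfl] at *
      rw [this]

theorem loopA_of_le (d : Int) (s : List Int) (damage hacks : Int) (fuel : Nat)
    (h : damage ≤ d) : loopA d s damage hacks fuel = hacks := by
  cases fuel with
  | zero => rfl
  | succ f => simp only [loopA]; rw [if_neg (by omega)]

theorem fdiv_one (w x : Int) (hw : 0 < w) (h1 : 1 ≤ x) (h2 : x ≤ w) :
    PySem.Int.floordiv (x + w - 1) w = 1 := by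
  rw [PySem.Int.floordiv_eq_ediv_of_pos hw]
  have e : x + w - 1 = (x - 1) + 1 * w := by ring
  rw [e, Int.add_mul_ediv_right _ _ (by omega)]
  rw [Int.ediv_eq_zero_of_lt (by omega) (by omega)]
  norm_num

theorem fdiv_shift (w y : Int) (hw : 0 < w) :
    PySem.Int.floordiv (y + w) w = PySem.Int.floordiv y w + 1 := by
  rw [PySem.Int.floordiv_eq_ediv_of_pos hw, PySem.Int.floordiv_eq_ediv_of_pos hw]
  have e : y + w = y + 1 * w := by ring
  rw [e, Int.add_mul_ediv_right _ _ (by omega)]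

theorem batch (t : Nat) (d : Int) (ht : 1 ≤ t) : ∀ (c : Nat) (s₀ : List Int) (damage hacks : Int) (fuel : Nat),
    (∀ x ∈ s₀, x < (t : Int)) → d < damage → (damage - d).toNat ≤ fuel →
    loopA d (s₀ ++ List.replicate c ((t : Nat) : Int)) damage hacks fuel =
      if damage - (c : Int) * 2 ^ (t - 1) ≤ d then
        hacks + PySem.Int.floordiv (damage - d + 2 ^ (t - 1) - 1) (2 ^ (t - 1))
      else
        loopA d (s₀ ++ List.replicate c (((t : Nat) : Int) - 1))
          (damage - (c : Int) * 2 ^ (t - 1)) (hacks + (c : Int)) (fuel - c) := by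
  intro c
  induction c with
  | zero =>
      intro s₀ damage hacks fuel hb hd hf
      rw [if_neg (by push_cast; omega)]
      simp
  | succ c ih =>
      intro s₀ damage hacks fuel hb hd hf
      have hw : (0:Int) < 2 ^ (t - 1) := by positivity
      obtain ⟨f, rfl⟩ : ∃ f, fuel = f + 1 := ⟨fuel - 1, by omega⟩
      have hlen : (s₀ ++ List.replicate (c+1) ((t:Nat):Int)).length = (s₀.length + c) + 1 := by
        simp [List.length_append]
        omega
      have hscan : findHack (s₀ ++ List.replicate (c+1) ((t:Nat):Int)) =
          some (s₀ ++ (((t:Nat):Int) - 1) :: List.replicate c ((t:Nat):Int), ((t:Nat):Int) - 1) := by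
        rw [findHack, hlen]
        exact (scan_skip s₀ c _ c (le_refl c)).trans
          (scan_hit s₀ c _ (by exact_mod_cast ht) hb)
      have hpow : (2:Int) ^ ((((t:Nat):Int) - 1).toNat) = 2 ^ (t - 1) := by
        congr 1; omega
      simp only [loopA, if_pos hd, hscan, hpow]
      have hassoc : s₀ ++ (((t:Nat):Int) - 1) :: List.replicate c ((t:Nat):Int)
          = (s₀ ++ [((t:Nat):Int) - 1]) ++ List.replicate c ((t:Nat):Int) := by
        simp
      by_cases h1 : damage - 2 ^ (t - 1) ≤ d
      · rw [loopA_of_le _ _ _ _ _ h1]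
        rw [if_pos (by
          have h0 : 0 ≤ (c:Int) * 2 ^ (t-1) := by positivity
          have h2 : (((c:Nat)+1 : Nat) : Int) * 2 ^ (t-1) = (c:Int) * 2 ^ (t-1) + 2 ^ (t-1) := by
            push_cast; ring
          rw [h2]; linarith)]
        rw [fdiv_one _ _ hw (by omega) (by omega)]
      · rw [hassoc]
        rw [ih (s₀ ++ [((t:Nat):Int) - 1]) (damage - 2 ^ (t-1)) (hacks + 1) f
          (by
            intro x hx
            rcases List.mem_append.1 hx with hx | hx
            · exact hb x hx
            · simp at hx; omega)
          (by omega) (by omega)]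
        have he : damage - 2 ^ (t-1) - (c:Int) * 2 ^ (t-1)
            = damage - (((c:Nat)+1 : Nat) : Int) * 2 ^ (t-1) := by push_cast; ring
        rw [he]
        by_cases h2 : damage - (((c:Nat)+1 : Nat) : Int) * 2 ^ (t-1) ≤ d
        · rw [if_pos h2, if_pos h2]
          rw [show damage - d + 2 ^ (t-1) - 1
              = (damage - 2 ^ (t-1) - d + 2 ^ (t-1) - 1) + 2 ^ (t-1) from by ring]
          rw [fdiv_shift _ _ hw]
          ring
        · rw [if_neg h2, if_neg h2]
          have l1 : (s₀ ++ [((t:Nat):Int) - 1]) ++ List.replicate c (((t:Nat):Int) - 1)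
              = s₀ ++ List.replicate (c+1) (((t:Nat):Int) - 1) := by
            simp [List.replicate_succ]
          have l2 : hacks + 1 + (c:Int) = hacks + (((c:Nat)+1 : Nat) : Int) := by push_cast; ring
          have l3 : f - c = f + 1 - (c+1) := by omega
          rw [l1, l2, l3]

theorem expand_take_succ (ls : List Int) (j : Nat) :
    expandFrom 0 (ls.take (j+1)) =
      expandFrom 0 (ls.take j) ++ List.replicate (ls.getD j 0).toNat ((j : Nat) : Int) := by
  by_cases hj : j < ls.length
  · rw [List.take_add_one]
    rw [expandFrom_append]
    have : ls[j]? = some ls[j] := List.getElem?_eq_getElem hj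
    simp [this, List.getD, expandFrom, List.length_take, Nat.min_eq_left (le_of_lt hj)]
  · have h1 : ls.take (j+1) = ls := List.take_of_length_le (by omega)
    have h2 : ls.take j = ls := List.take_of_length_le (by omega)
    have h3 : ls[j]? = none := by rw [List.getElem?_eq_none_iff]; omega
    simp [h1, h2, List.getD, h3]

theorem getD_nonneg' (levels : List Int) (hl : ∀ x ∈ levels, 0 ≤ x) (j : Nat) :
    0 ≤ levels.getD j 0 := by
  unfold List.getD
  cases h : levels[j]? with
  | none => simp
  | some v => simpa using hl v (List.mem_of_getElem? h)

theorem loop_link (levels : List Int) (d : Int) (hl : ∀ x ∈ levels, 0 ≤ x) :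
    ∀ (j : Nat) (carry damage hacks : Int) (fuel : Nat),
    0 ≤ carry → d < damage →
    damage = Dm (expandFrom 0 (levels.take j) ++
        List.replicate (carry + levels.getD j 0).toNat ((j : Nat) : Int)) →
    ((expandFrom 0 (levels.take j) ++
        List.replicate (carry + levels.getD j 0).toNat ((j : Nat) : Int)).length : Int) ≤ d →
    (damage - d).toNat ≤ fuel →
    loopA d (expandFrom 0 (levels.take j) ++
        List.replicate (carry + levels.getD j 0).toNat ((j : Nat) : Int)) damage hacks fuel
      = loopB d levels j damage hacks carry := by
  intro j
  induction j with
  | zero =>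
      intro carry damage hacks fuel hc hd hdm hlen hf
      exfalso
      simp only [List.take_zero, expandFrom, List.nil_append] at hdm hlen
      rw [Dm_replicate] at hdm
      simp only [Nat.cast_zero, Int.toNat_zero, pow_zero, mul_one, List.length_replicate] at hdm hlen
      omega
  | succ j ihj =>
      intro carry damage hacks fuel hc hd hdm hlen hf
      have hgj1 : 0 ≤ levels.getD (j+1) 0 := getD_nonneg' levels hl (j+1)
      have hgj : 0 ≤ levels.getD j 0 := getD_nonneg' levels hl j
      set c' := carry + levels.getD (j+1) 0 with hcdef
      have hc0 : 0 ≤ c' := by omega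
      have hn : ((c'.toNat : Nat) : Int) = c' := by omega
      by_cases hz : c' = 0
      · -- no shots at this level: both loops just move down one level
        have hB : loopB d levels (j+1) damage hacks carry = loopB d levels j damage hacks c' := by
          simp only [loopB]
          rw [if_neg (by omega)]
        rw [hB]
        have hrw : expandFrom 0 (levels.take (j+1)) ++
              List.replicate c'.toNat (((j+1) : Nat) : Int)
            = expandFrom 0 (levels.take j) ++
              List.replicate (c' + levels.getD j 0).toNat ((j : Nat) : Int) := by
          rw [hz]
          simp only [Int.toNat_zero, List.replicate_zero, List.append_nil, zero_add]
          exact expand_take_succ levels j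
        rw [hrw] at hdm hlen ⊢
        exact ihj c' damage hacks fuel hc0 hd hdm hlen hf
      · -- a non-empty batch of shots at level j+1
        have hb : ∀ x ∈ expandFrom 0 (levels.take (j+1)), x < (((j+1) : Nat) : Int) := by
          intro x hx
          have h1 := mem_expandFrom x _ _ hx
          have h2 : (levels.take (j+1)).length ≤ j + 1 := by
            simp [List.length_take]
          push_cast at h1 ⊢
          omega
        have hbatch := batch (j+1) d (by omega) c'.toNat
          (expandFrom 0 (levels.take (j+1))) damage hacks fuel hb hd hf
        simp only [Nat.add_sub_cancel, hn] at hbatch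
        rw [hbatch]
        have hB : loopB d levels (j+1) damage hacks carry =
            if damage - c' * 2 ^ j ≤ d then
              hacks + PySem.Int.floordiv (damage - d + 2 ^ j - 1) (2 ^ j)
            else loopB d levels j (damage - c' * 2 ^ j) (hacks + c') c' := by
          simp only [loopB]
          rw [if_pos (by omega)]
        rw [hB]
        by_cases hstop : damage - c' * 2 ^ j ≤ d
        · rw [if_pos hstop, if_pos hstop]
        · rw [if_neg hstop, if_neg hstop]
          have vcast : ((((j+1) : Nat) : Int) - 1) = ((j : Nat) : Int) := by push_cast; ring
          have lEq : expandFrom 0 (levels.take (j+1)) ++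
                List.replicate c'.toNat ((j : Nat) : Int)
              = expandFrom 0 (levels.take j) ++
                List.replicate (c' + levels.getD j 0).toNat ((j : Nat) : Int) := by
            rw [expand_take_succ levels j, List.append_assoc, List.replicate_append_replicate]
            have : (levels.getD j 0).toNat + c'.toNat = (c' + levels.getD j 0).toNat := by omega
            rw [this]
          rw [vcast, lEq]
          have hdm' := hdm
          rw [Dm_append, Dm_replicate] at hdm'
          simp only [Int.toNat_natCast] at hdm'
          rw [hn, pow_succ] at hdm'
          have hdmNew : damage - c' * 2 ^ j =
              Dm (expandFrom 0 (levels.take j) ++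
                List.replicate (c' + levels.getD j 0).toNat ((j : Nat) : Int)) := by
            rw [← lEq, Dm_append, Dm_replicate]
            simp only [Int.toNat_natCast]
            rw [hn]
            nlinarith [hdm']
          have hlen' : (((expandFrom 0 (levels.take j) ++
                List.replicate (c' + levels.getD j 0).toNat ((j : Nat) : Int)).length : Nat) : Int) ≤ d := by
            rw [← lEq]
            simp only [List.length_append, List.length_replicate] at hlen ⊢
            omega
          have hXge : ((c'.toNat : Nat) : Int) ≤ ((c'.toNat : Nat) : Int) * 2 ^ j := by
            have h2 : (1:Int) ≤ 2 ^ j := by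
              have := pow_pos (by norm_num : (0:Int) < 2) j
              omega
            exact le_mul_of_one_le_right (by omega) h2
          rw [hn] at hXge
          have hfuel : (damage - c' * 2 ^ j - d).toNat ≤ fuel - c'.toNat := by
            set X := c' * 2 ^ j with hXdef
            omega
          exact ihj c' (damage - c' * 2 ^ j) (hacks + c') (fuel - c'.toNat)
            hc0 (by omega) hdmNew hlen' hfuel

-- ===== VERDICT (by name: the statement is the Claim_ definition above) =====
theorem solve_spec : Claim_equal_solve := by
  unfold Claim_equal_solve
  intro d p _
  unfold Spec_solve solve solve_alt
  have hinit : goodB ([], 0, 0) := ⟨le_refl _, by simp, by simp [linkInv, expandFrom]⟩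
  obtain ⟨hcur, hnn, hm⟩ := (build_link p.toList ([], 0, 0) hinit).2
  have h0 : p.toList.foldl stepA ([], 0) = linkInv (p.toList.foldl stepB ([], 0, 0)) := by
    have h := (build_link p.toList ([], 0, 0) hinit).1
    have h1 : linkInv ([], 0, 0) = (([] : List Int), (0 : Int)) := by
      simp [linkInv, expandFrom]
    rw [h1] at h
    exact h
  set fB := p.toList.foldl stepB ([], 0, 0) with hfB
  simp only [h0, linkInv] at hm ⊢
  set S := expandFrom 0 fB.1 ++ List.replicate fB.2.1.toNat (fB.1.length : Int) with hS
  have hLnn : ∀ x ∈ fB.1 ++ [fB.2.1], 0 ≤ x := by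
    intro x hx
    rcases List.mem_append.1 hx with hx | hx
    · exact hnn x hx
    · simp at hx; omega
  have hexp : expandFrom 0 (fB.1 ++ [fB.2.1]) = S := by
    rw [expandFrom_append]
    simp only [expandFrom, List.append_nil, zero_add]
    rw [hS]
  have hdamA : S.foldl (fun acc x => acc + 2 ^ x.toNat) 0 = Dm S := by
    rw [foldl_damageA]; ring
  have hdamB : damageB (fB.1 ++ [fB.2.1]) 0 0 = Dm S := by
    rw [damageB_eq _ _ _ hLnn, hexp]; ring
  simp only [hdamA, hdamB, hm]
  have htake : (fB.1 ++ [fB.2.1]).take fB.1.length = fB.1 := by simp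
  have hget : (fB.1 ++ [fB.2.1]).getD fB.1.length 0 = fB.2.1 := by
    simp only [List.getD]
    rw [List.getElem?_append_right (le_refl _)]
    simp
  have hX : expandFrom 0 ((fB.1 ++ [fB.2.1]).take fB.1.length) ++
      List.replicate ((0 : Int) + (fB.1 ++ [fB.2.1]).getD fB.1.length 0).toNat
        ((fB.1.length : Nat) : Int) = S := by
    rw [htake, hget, zero_add]
  have hlen1 : (fB.1 ++ [fB.2.1]).length - 1 = fB.1.length := by simp
  split_ifs with hmgt hdam
  · rfl
  · rfl
  · rw [hlen1]
    rw [← loop_link (fB.1 ++ [fB.2.1]) d hLnn fB.1.length 0 (Dm S) 0 ((Dm S - d).toNat)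
      (le_refl 0) (by omega) (by rw [hX]) (by rw [hX]; omega) (le_refl _)]
    rw [hX]
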